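-- pv_equiv track=rewrite | github.com/Skipper126/herding | herding/envs/assets/controller/agents_workers_factory.py | _get_workers_ranges
-- ===== SOURCE A (Python) =====
-- import math
--
-- def _get_workers_ranges(agents_count, workers_count):
--     workers_ranges = []
--
--     j = 0
--     for i in range(workers_count):
--         workers_ranges.append([])
--         for _ in range(int(math.ceil(agents_count / workers_count))):
--             if j < agents_count:
--                 workers_ranges[i].append(j)
--                 j += 1
--             else:
--                 break
--
--     return workers_ranges
-- ===== SOURCE B (Python) =====
-- def _get_workers_ranges(agents_count, workers_count):
--     # One flat pass over agent indices; destination worker = j // chunk.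
--     buckets = [[] for _ in range(workers_count)]
--     if workers_count > 0 and agents_count > 0:
--         chunk = -(-agents_count // workers_count)  # exact ceiling division
--         for j in range(agents_count):
--             buckets[j // chunk].append(j)
--     return buckets
-- ===== Notes on version B (the rewrite author's own statement) =====
-- stated objective: faster
-- what changed: Replaces A's nested worker/inner-count loops (with a per-worker float division and math.ceil call) by pre-created buckets and a single flat pass over agent indices that routes each index j to bucket j // chunk via exact integer ceiling division computed once.
import Mathlib
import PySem

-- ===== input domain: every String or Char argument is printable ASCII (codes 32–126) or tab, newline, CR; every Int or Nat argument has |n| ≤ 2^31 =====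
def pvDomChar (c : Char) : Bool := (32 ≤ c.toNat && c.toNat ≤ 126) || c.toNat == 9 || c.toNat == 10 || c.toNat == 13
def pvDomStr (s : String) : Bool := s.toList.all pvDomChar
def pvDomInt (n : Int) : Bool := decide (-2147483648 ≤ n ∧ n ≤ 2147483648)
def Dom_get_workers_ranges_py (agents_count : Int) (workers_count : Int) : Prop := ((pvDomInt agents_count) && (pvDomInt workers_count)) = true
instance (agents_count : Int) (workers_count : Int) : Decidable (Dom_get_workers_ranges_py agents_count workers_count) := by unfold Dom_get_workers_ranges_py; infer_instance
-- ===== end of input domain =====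

-- B replaces A's nested worker/inner-count loops by pre-created buckets and one flat pass over
-- agent indices routed by integer ceiling division (a different decomposition, similar cost).

-- ===== PORT A =====
-- inner 'for _ in range(chunk): if j < agents_count: append j; j += 1 else: break'
def pvInnerA (agents_count : Int) : Nat → Int → List Int → List Int × Int
  | 0, j, b => (b, j)
  | n+1, j, b => if j < agents_count then pvInnerA agents_count n (j+1) (b ++ [j]) else (b, j)

def get_workers_ranges_py (agents_count : Int) (workers_count : Int) : List (List Int) :=
  ((PySem.List.pyRange 0 workers_count 1).foldl
    (fun (st : List (List Int) × Int) _ =>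
      -- int(math.ceil(agents_count / workers_count)) is exact integer ceiling division on Dom
      -- (|n| ≤ 2^31 keeps the float quotient's ceil equal to the exact one); the loop only
      -- runs when workers_count > 0, so the divisor is nonzero here.
      let chunk : Int := -(PySem.Int.floordiv (-agents_count) workers_count)
      let r := pvInnerA agents_count chunk.toNat st.2 []
      (st.1 ++ [r.1], r.2))
    ([], 0)).1

-- ===== PORT B =====
def get_workers_ranges_py_alt (agents_count : Int) (workers_count : Int) : List (List Int) :=
  let buckets : List (List Int) := List.replicate workers_count.toNat []
  if workers_count > 0 ∧ agents_count > 0 then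
    let chunk : Int := -(PySem.Int.floordiv (-agents_count) workers_count)
    (PySem.List.pyRange 0 agents_count 1).foldl
      (fun bs j => bs.modify (PySem.Int.floordiv j chunk).toNat (· ++ [j])) buckets
  else buckets

-- ===== PRECONDITION & SPEC =====
def Spec_get_workers_ranges_py (agents_count : Int) (workers_count : Int) (out : List (List Int)) : Prop := out = get_workers_ranges_py_alt agents_count workers_count
instance (agents_count : Int) (workers_count : Int) (out : List (List Int)) : Decidable (Spec_get_workers_ranges_py agents_count workers_count out) := by unfold Spec_get_workers_ranges_py; infer_instance

-- ===== CLAIM (what is proved, stated in full; the proofs are below) =====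
def Claim_equal_get_workers_ranges_py : Prop := ∀ (agents_count : Int) (workers_count : Int), Dom_get_workers_ranges_py agents_count workers_count → Spec_get_workers_ranges_py agents_count workers_count (get_workers_ranges_py agents_count workers_count)

-- ===== LEMMAS AND PROOFS =====

-- the common shape both ports reach: bucket list built left to right, cursor s, chunk size c
def pvMkB (c aN : Nat) : Nat → Nat → List (List Int)
  | 0, _ => []
  | n+1, s => (List.range' s (min c (aN - s))).map (fun (t : Nat) => (t : Int)) :: pvMkB c aN n (s + min c (aN - s))

lemma pv_modify_id (l : List (List Int)) (i : Nat) : l.modify i (fun x => x) = l := by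
  induction l generalizing i with
  | nil => simp
  | cons h t ih => cases i <;> simp [List.modify_cons, ih]

lemma pv_modify_append_cons (pre rest : List (List Int)) (x : List Int) (f : List Int → List Int) :
    (pre ++ x :: rest).modify pre.length f = pre ++ f x :: rest := by
  induction pre with
  | nil => simp [List.modify_cons]
  | cons h t ih => simpa [List.modify_cons] using ih

-- A's inner loop appends s, s+1, … while below agents_count, at most n of them
lemma pv_innerA_spec (aN : Nat) : ∀ (n s : Nat) (b : List Int), s ≤ aN →
    pvInnerA (aN : Int) n (s : Int) b
      = (b ++ (List.range' s (min n (aN - s))).map (fun (t : Nat) => (t : Int)), ((min aN (s + n) : Nat) : Int)) := by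
  intro n
  induction n with
  | zero => intro s b hs; simp [pvInnerA]; omega
  | succ n ih =>
    intro s b hs
    by_cases h : s < aN
    · have hlt : (s : Int) < (aN : Int) := by exact_mod_cast h
      have h1 : min (n+1) (aN - s) = (min n (aN - (s+1))) + 1 := by omega
      have h2 : ((s : Int) + 1) = ((s + 1 : Nat) : Int) := by push_cast; ring
      simp only [pvInnerA, if_pos hlt, h2, ih (s+1) (b ++ [(s : Int)]) (by omega)]
      rw [h1, List.range'_succ, Prod.mk.injEq]
      constructor
      · simp
      · congr 1
        omega
    · have hs' : s = aN := by omega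
      subst hs'
      simp [pvInnerA]

-- A's outer loop: each iteration emits one chunk-sized block and advances the cursor
lemma pv_foldA_spec (aN c : Nat) : ∀ (l : List Int) (acc : List (List Int)) (s : Nat), s ≤ aN →
    l.foldl (fun (st : List (List Int) × Int) _ =>
        let r := pvInnerA (aN : Int) c st.2 []
        (st.1 ++ [r.1], r.2)) (acc, (s : Int))
      = (acc ++ pvMkB c aN l.length s, ((min aN (s + c * l.length) : Nat) : Int)) := by
  intro l
  induction l with
  | nil => intro acc s hs; simp [pvMkB]; omega
  | cons x t ih =>
    intro acc s hs
    simp only [List.foldl_cons, pv_innerA_spec aN c s [] hs, List.nil_append]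
    have h1 : min aN (s + c) = s + min c (aN - s) := by omega
    rw [h1, ih (acc ++ [(List.range' s (min c (aN - s))).map (fun (t : Nat) => (t : Int))]) _ (by omega)]
    have hm : c * (t.length + 1) = c * t.length + c := by ring
    simp only [List.length_cons, pvMkB, List.append_assoc, List.singleton_append, Prod.mk.injEq]
    rw [hm]
    constructor
    · trivial
    · congr 1
      omega

-- folding appends whose target bucket is constant = one modify with the whole block
lemma pv_blockFold (c : Nat) (i : Nat) : ∀ (ts : List Nat) (bs : List (List Int)),
    (∀ t ∈ ts, t / c = i) →
    ts.foldl (fun bs t => bs.modify (t / c) (· ++ [(t : Int)])) bs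
      = bs.modify i (· ++ ts.map (fun (t : Nat) => (t : Int))) := by
  intro ts
  induction ts with
  | nil =>
    intro bs _
    simp [pv_modify_id]
  | cons t ts ih =>
    intro bs h
    have ht : t / c = i := h t (by simp)
    simp only [List.foldl_cons, ht, ih _ (fun u hu => h u (by simp [hu])), List.modify_modify_eq]
    congr 1
    funext l
    simp

-- B's flat pass, viewed chunk block by chunk block
lemma pv_foldB_spec (aN c : Nat) (hc : 0 < c) : ∀ (n i : Nat) (pre : List (List Int)),
    pre.length = i → aN ≤ c * (i + n) →
    (List.range' (min (i*c) aN) (aN - min (i*c) aN)).foldl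
        (fun bs t => bs.modify (t / c) (· ++ [(t : Int)])) (pre ++ List.replicate n [])
      = pre ++ pvMkB c aN n (min (i*c) aN) := by
  intro n
  induction n with
  | zero =>
    intro i pre hpre hcov
    have hcov2 : aN ≤ i * c := by
      calc aN ≤ c * (i + 0) := hcov
        _ = i * c := by ring
    have h0 : min (i*c) aN = aN := by omega
    simp [h0, pvMkB]
  | succ n ih =>
    intro i pre hpre hcov
    set s := min (i*c) aN with hsdef
    set cnt := min c (aN - s) with hcnt
    have hmul : (i+1)*c = i*c + c := by ring
    have hcov2 : aN ≤ i*c + c + c*n := by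
      calc aN ≤ c * (i + (n+1)) := hcov
        _ = i*c + c + c*n := by ring
    have hs1 : s + cnt = min ((i+1)*c) aN := by omega
    have hsplit : List.range' s (aN - s) = List.range' s cnt ++ List.range' (s + cnt) (aN - (s + cnt)) := by
      rw [List.range'_append_1]
      congr 1
      omega
    rw [hsplit, List.foldl_append]
    have hdiv : ∀ t ∈ List.range' s cnt, t / c = i := by
      intro t ht
      rw [List.mem_range'_1] at ht
      have hmul' : c*(i+1) = i*c + c := by ring
      have hlow : i * c ≤ s := by omega
      exact Nat.div_eq_of_lt_le (by omega) (by omega)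
    rw [pv_blockFold c i _ _ hdiv]
    have hrep : pre ++ List.replicate (n+1) ([] : List Int) = pre ++ ([] : List Int) :: List.replicate n [] := by
      simp [List.replicate_succ]
    rw [hrep, ← hpre, pv_modify_append_cons]
    have hmod : ((([] : List Int) ++ (List.range' s cnt).map (fun (t : Nat) => (t : Int))) :: List.replicate n ([] : List Int))
        = ((List.range' s cnt).map (fun (t : Nat) => (t : Int)) :: List.replicate n []) := by simp
    rw [hmod]
    have hih := ih (i+1) (pre ++ [(List.range' s cnt).map (fun (t : Nat) => (t : Int))])
      (by simp [hpre]) (by calc aN ≤ c * (i + (n+1)) := hcov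
                            _ = c * ((i+1) + n) := by ring)
    rw [← hs1] at hih
    calc (List.range' (s + cnt) (aN - (s + cnt))).foldl
            (fun bs t => bs.modify (t / c) (· ++ [(t : Int)]))
            (pre ++ (List.range' s cnt).map (fun (t : Nat) => (t : Int)) :: List.replicate n [])
        = (List.range' (s + cnt) (aN - (s + cnt))).foldl
            (fun bs t => bs.modify (t / c) (· ++ [(t : Int)]))
            ((pre ++ [(List.range' s cnt).map (fun (t : Nat) => (t : Int))]) ++ List.replicate n []) := by
          simp
      _ = (pre ++ [(List.range' s cnt).map (fun (t : Nat) => (t : Int))]) ++ pvMkB c aN n (s + cnt) := hih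
      _ = pre ++ pvMkB c aN (n+1) s := by
          simp only [pvMkB, ← hcnt, List.append_assoc, List.singleton_append]

-- constant-appending fold (a ≤ 0 case: the inner loop's fuel is 0)
lemma pv_foldConst : ∀ (l : List Int) (acc : List (List Int)) (j : Int),
    l.foldl (fun (st : List (List Int) × Int) _ => (st.1 ++ [([] : List Int)], st.2)) (acc, j)
      = (acc ++ List.replicate l.length [], j) := by
  intro l
  induction l with
  | nil => simp
  | cons x t ih =>
    intro acc j
    simp only [List.foldl_cons, ih, List.length_cons, List.append_assoc, List.singleton_append,
      Prod.mk.injEq]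
    refine ⟨?_, trivial⟩
    rw [List.replicate_succ]

-- ===== VERDICT (by name: the statement is the Claim_ definition above) =====
theorem get_workers_ranges_py_spec : Claim_equal_get_workers_ranges_py := by
  intro a w _
  unfold Spec_get_workers_ranges_py get_workers_ranges_py get_workers_ranges_py_alt
  dsimp only
  by_cases hw : 0 < w
  · obtain ⟨wn, rfl⟩ : ∃ m : Nat, w = (m : Int) := ⟨w.toNat, by omega⟩
    by_cases ha : 0 < a
    · -- main case: w > 0, a > 0
      obtain ⟨aN, rfl⟩ : ∃ m : Nat, a = (m : Int) := ⟨a.toNat, by omega⟩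
      have hceil : (-(PySem.Int.floordiv (-((aN : Nat) : Int)) ((wn : Nat) : Int)) - 1) * ((wn : Nat) : Int) < ((aN : Nat) : Int)
          ∧ ((aN : Nat) : Int) ≤ -(PySem.Int.floordiv (-((aN : Nat) : Int)) ((wn : Nat) : Int)) * ((wn : Nat) : Int) :=
        (PySem.Int.neg_floordiv_neg_eq_iff_of_pos hw).mp rfl
      have hcpos : 0 < -(PySem.Int.floordiv (-((aN : Nat) : Int)) ((wn : Nat) : Int)) := by
        nlinarith [hceil.1, hceil.2]
      obtain ⟨c, hc⟩ : ∃ m : Nat, -(PySem.Int.floordiv (-((aN : Nat) : Int)) ((wn : Nat) : Int)) = (m : Int) :=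
        ⟨(-(PySem.Int.floordiv (-((aN : Nat) : Int)) ((wn : Nat) : Int))).toNat, by omega⟩
      have hcpos' : 0 < c := by exact_mod_cast hc ▸ hcpos
      have hcov : aN ≤ c * wn := by
        have h2 := hceil.2
        rw [hc] at h2
        exact_mod_cast h2
      rw [if_pos ⟨hw, ha⟩, hc, PySem.List.pyRange_zero_natCast, PySem.List.pyRange_zero_natCast]
      -- A side
      have hA := pv_foldA_spec aN c ((List.range wn).map (fun (k : Nat) => (k : Int))) [] 0 (Nat.zero_le _)
      simp only [List.length_map, List.length_range, Nat.cast_zero, List.nil_append] at hA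
      rw [show ((c : Nat) : Int).toNat = c by omega, hA]
      -- B side
      rw [List.foldl_map]
      have hstep : (fun (bs : List (List Int)) (t : Nat) =>
            bs.modify (PySem.Int.floordiv ((t : Nat) : Int) ((c : Nat) : Int)).toNat (· ++ [((t : Nat) : Int)]))
          = (fun bs t => bs.modify (t / c) (· ++ [(t : Int)])) := by
        funext bs t
        rw [PySem.Int.floordiv_natCast, Int.toNat_natCast]
      rw [hstep]
      have hB := pv_foldB_spec aN c hcpos' wn 0 [] rfl (by simpa using hcov)
      simp only [Nat.zero_mul, Nat.min_eq_left (Nat.zero_le aN), Nat.sub_zero, List.nil_append] at hB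
      rw [Int.toNat_natCast, List.range_eq_range', hB]
    · -- w > 0, a ≤ 0: every bucket stays empty
      have hceil : (-(PySem.Int.floordiv (-a) ((wn : Nat) : Int)) - 1) * ((wn : Nat) : Int) < a
          ∧ a ≤ -(PySem.Int.floordiv (-a) ((wn : Nat) : Int)) * ((wn : Nat) : Int) :=
        (PySem.Int.neg_floordiv_neg_eq_iff_of_pos hw).mp rfl
      have hcle : -(PySem.Int.floordiv (-a) ((wn : Nat) : Int)) ≤ 0 := by
        nlinarith [hceil.1, hceil.2]
      have hcz : (-(PySem.Int.floordiv (-a) ((wn : Nat) : Int))).toNat = 0 := by omega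
      rw [if_neg (by intro h; exact ha h.2), PySem.List.pyRange_zero_natCast, hcz]
      have hfold := pv_foldConst ((List.range wn).map (fun (k : Nat) => (k : Int))) [] 0
      calc (((List.range wn).map (fun (k : Nat) => (k : Int))).foldl
              (fun (st : List (List Int) × Int) _ => (st.1 ++ [(pvInnerA a 0 st.2 []).1], (pvInnerA a 0 st.2 []).2)) ([], 0)).1
          = (((List.range wn).map (fun (k : Nat) => (k : Int))).foldl
              (fun (st : List (List Int) × Int) _ => (st.1 ++ [([] : List Int)], st.2)) ([], 0)).1 := by rfl
        _ = List.replicate ((wn : Nat) : Int).toNat [] := by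
            rw [hfold]
            simp
  · -- w ≤ 0: both return []
    have hr : PySem.List.pyRange 0 w 1 = [] := by
      simp [PySem.List.pyRange]; omega
    have hwz : w.toNat = 0 := by omega
    rw [hr, if_neg (by intro h; exact hw h.1)]
    simp [hwz]
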